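-- pv_equiv track=rewrite | github.com/vlifanoff/CodewarsKata | 4_kyu/text_align_justify.py | get_whitespaces
-- ===== SOURCE A (Python) =====
-- def get_whitespaces(ltext, width):
--     ws = []
--
--     for x in ltext:
--         lt = len(x) - 1
--         tmp = []
--         if lt > 0:
--             tmp = [' ' for __ in range(lt)]
--             size = len("".join(x))
--             wspaces = width - size - lt
--
--             while wspaces >= lt:
--                 wspaces -= lt
--                 tmp = [i + ' ' for i in tmp]
--
--             if wspaces < lt:
--                 for i in range(wspaces):
--                     tmp[i] += ' '
--             else:
--                 wspaces -= lt
--                 tmp = [i + ' ' for i in tmp]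
--
--         tmp.append("\n")
--         ws.append(tmp)
--
--     for i in range(len(ws[-1])):
--         ws[-1][i] = ' '
--
--     ws[-1][-1] = ''
--
--     return ws
-- ===== SOURCE B (Python) =====
-- def get_whitespaces(ltext, width):
--     ws = []
--     for x in ltext[:-1]:
--         line = []
--         gaps = len(x) - 1
--         if gaps > 0:
--             extra = width - sum(len(w) for w in x) - gaps
--             q, r = divmod(max(extra, 0), gaps)
--             line = [' ' * (1 + q + (1 if i < r else 0)) for i in range(gaps)]
--         line.append("\n")
--         ws.append(line)
--     last = ltext[-1]
--     ws.append([' '] * max(len(last) - 1, 0) + [''])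
--     return ws
-- ===== Notes on version B (the rewrite author's own statement) =====
-- stated objective: faster
-- what changed: Instead of A's while-loop that repeatedly rebuilds the whole gap list one space at a time plus a fix-up pass, B computes quotient/remainder of the extra spaces with divmod once per line and builds each gap string directly by string multiplication; the special all-blank last line is built directly from the word count.
import Mathlib
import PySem

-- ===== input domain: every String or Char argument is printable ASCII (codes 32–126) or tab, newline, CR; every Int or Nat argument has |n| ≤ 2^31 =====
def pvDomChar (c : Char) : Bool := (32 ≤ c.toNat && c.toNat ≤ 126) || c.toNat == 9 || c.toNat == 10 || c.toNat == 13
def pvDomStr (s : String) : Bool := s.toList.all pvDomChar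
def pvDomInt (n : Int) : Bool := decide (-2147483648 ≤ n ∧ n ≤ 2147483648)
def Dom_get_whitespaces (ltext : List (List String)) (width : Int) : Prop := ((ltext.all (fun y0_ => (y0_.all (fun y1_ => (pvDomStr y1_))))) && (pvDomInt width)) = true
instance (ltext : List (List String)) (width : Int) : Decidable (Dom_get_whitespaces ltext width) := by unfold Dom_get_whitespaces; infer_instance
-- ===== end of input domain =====

-- B replaces A's space-distributing while-loop (which repeatedly rebuilds the whole gap list one
-- space at a time) by one divmod per line and direct string multiplication. Objective: faster.


-- ===== PORT A =====
-- the `while wspaces >= lt:` loop; `hlt : 0 < lt` holds at the call site (inside `if lt > 0`)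
def aWhile (lt : Int) (hlt : 0 < lt) (wspaces : Int) (tmp : List String) : Int × List String :=
  if _h : lt ≤ wspaces then
    aWhile lt hlt (wspaces - lt) (tmp.map (fun i => i ++ " "))
  else (wspaces, tmp)
  termination_by wspaces.toNat
  decreasing_by omega

-- one iteration of A's `for x in ltext` loop body (the value appended to ws)
def aLine (width : Int) (x : List String) : List String :=
  let lt : Int := (x.length : Int) - 1
  if h : 0 < lt then
    let tmp : List String := List.replicate lt.toNat " "
    let size : Int := PySem.Str.len (PySem.Str.join "" x)
    let wt := aWhile lt h (width - size - lt) tmp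
    let tmp :=
      if wt.1 < lt then
        (PySem.List.pyRange 0 wt.1 1).foldl
          (fun t i => PySem.List.pySetD t i (PySem.List.pyGetD t i "" ++ " ")) wt.2
      else wt.2.map (fun i => i ++ " ")
    tmp ++ ["\n"]
  else
    [] ++ ["\n"]

def get_whitespaces (ltext : List (List String)) (width : Int) : List (List String) :=
  let ws := ltext.foldl (fun ws x => ws ++ [aLine width x]) []
  match ws.getLast? with
  | none => []
  | some last =>
      let last := (PySem.List.pyRange 0 (last.length : Int) 1).foldl
        (fun t i => PySem.List.pySetD t i " ") last
      let last := PySem.List.pySetD last (-1) ""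
      ws.dropLast ++ [last]

-- ===== PORT B =====
def spacesStr (n : Int) : String := String.ofList (List.replicate n.toNat ' ')
   -- ' ' * n

-- B's loop body for a non-last line
def bLine (width : Int) (x : List String) : List String :=
  let gaps : Int := (x.length : Int) - 1
  (if 0 < gaps then
    let extra := width - x.foldl (fun a w => a + PySem.Str.len w) 0 - gaps
    let q := PySem.Int.floordiv (max extra 0) gaps
    let r := PySem.Int.mod (max extra 0) gaps
    (PySem.List.pyRange 0 gaps 1).map (fun i => spacesStr (1 + q + (if i < r then 1 else 0)))
  else []) ++ ["\n"]

def get_whitespaces_alt (ltext : List (List String)) (width : Int) : List (List String) :=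
  let body := (PySem.List.slice ltext none (some (-1))).map (bLine width)
  let last := PySem.List.pyGetD ltext (-1) []
  body ++ [List.replicate (max ((last.length : Int) - 1) 0).toNat " " ++ [""]]

-- ===== PRECONDITION & SPEC =====
-- Pre_ excludes only ltext = [], on which both Pythons raise IndexError (ws[-1] / ltext[-1]).
def Pre_get_whitespaces (ltext : List (List String)) (width : Int) : Prop := ltext ≠ []
instance (ltext : List (List String)) (width : Int) : Decidable (Pre_get_whitespaces ltext width) := by
  unfold Pre_get_whitespaces; infer_instance

def pvWitness_get_whitespaces : List (List String) × Int := ([["ab", "c", "de"], ["x"]], 12)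

def Spec_get_whitespaces (ltext : List (List String)) (width : Int) (out : List (List String)) : Prop := out = get_whitespaces_alt ltext width
instance (ltext : List (List String)) (width : Int) (out : List (List String)) : Decidable (Spec_get_whitespaces ltext width out) := by unfold Spec_get_whitespaces; infer_instance

-- ===== CLAIM (what is proved, stated in full; the proofs are below) =====
def Claim_equal_get_whitespaces : Prop := ∀ (ltext : List (List String)) (width : Int), Dom_get_whitespaces ltext width → Pre_get_whitespaces ltext width → Spec_get_whitespaces ltext width (get_whitespaces ltext width)

-- ===== LEMMAS AND PROOFS =====
lemma spaces_add {a b : Int} (ha : 0 ≤ a) (hb : 0 ≤ b) :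
    spacesStr a ++ spacesStr b = spacesStr (a + b) := by
  unfold spacesStr
  rw [← String.ofList_append, ← List.replicate_add]
  congr 2
  omega

lemma spaces_zero : spacesStr 0 = "" := rfl

lemma spaces_one : spacesStr 1 = " " := rfl

lemma joinflat_len : ∀ (parts : List (List Char)),
    (PySem.Chars.join [] parts).length = (parts.map List.length).sum
  | [] => by simp [PySem.Chars.join, List.intercalate]
  | [a] => by simp [PySem.Chars.join, List.intercalate]
  | a :: b :: rest => by
      have := joinflat_len (b :: rest)
      simp [PySem.Chars.join, List.intercalate, List.intersperse] at *
      omega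

lemma joinLen (x : List String) :
    PySem.Str.len (PySem.Str.join "" x) = x.foldl (fun a w => a + PySem.Str.len w) 0 := by
  have h1 : ∀ (c : Int) (l : List String),
      l.foldl (fun a w => a + PySem.Str.len w) c
        = c + (((l.map String.toList).map List.length).map (Nat.cast : Nat → Int)).sum := by
    intro c l
    induction l generalizing c with
    | nil => simp
    | cons y ys ih =>
        rw [List.foldl_cons, ih]
        rw [List.map_cons, List.map_cons, List.map_cons, List.sum_cons, PySem.Str.len_eq]
        ring
  rw [PySem.Str.len_eq, PySem.Str.toList_join, h1]
  have h2 : ("" : String).toList = [] := rfl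
  rw [h2, joinflat_len, ← Nat.cast_list_sum]
  simp

def aQ (lt w : Int) : Int := if 0 ≤ w then PySem.Int.floordiv w lt else 0

lemma aQ_nonneg (lt w : Int) (hlt : 0 < lt) : 0 ≤ aQ lt w := by
  unfold aQ
  split
  · rw [PySem.Int.floordiv_eq_ediv_of_pos hlt]
    exact Int.ediv_nonneg (by assumption) hlt.le
  · exact le_refl 0

lemma aQ_step (lt w : Int) (hlt : 0 < lt) (h : lt ≤ w) : aQ lt w = aQ lt (w - lt) + 1 := by
  unfold aQ
  rw [if_pos (by omega), if_pos (by omega)]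
  rw [PySem.Int.floordiv_eq_ediv_of_pos hlt, PySem.Int.floordiv_eq_ediv_of_pos hlt]
  have h2 : w - lt = w + (-1) * lt := by ring
  rw [h2, Int.add_mul_ediv_right _ _ hlt.ne']
  omega

lemma aQ_small (lt w : Int) (hlt : 0 < lt) (h : w < lt) : aQ lt w = 0 := by
  unfold aQ
  split
  · rw [PySem.Int.floordiv_eq_ediv_of_pos hlt]
    exact Int.ediv_eq_zero_of_lt (by assumption) h
  · rfl

lemma aWhile_spec (lt : Int) (hlt : 0 < lt) :
    ∀ (k : Nat) (w : Int), w.toNat ≤ k → ∀ (n : Nat) (s : String),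
    aWhile lt hlt w (List.replicate n s)
      = (w - lt * aQ lt w, List.replicate n (s ++ spacesStr (aQ lt w))) := by
  intro k
  induction k with
  | zero =>
      intro w hw n s
      rw [aWhile, dif_neg (by omega)]
      rw [aQ_small lt w hlt (by omega)]
      simp [spaces_zero]
  | succ k ih =>
      intro w hw n s
      by_cases h : lt ≤ w
      · rw [aWhile, dif_pos h, List.map_replicate]
        rw [ih (w - lt) (by omega) n (s ++ " ")]
        rw [aQ_step lt w hlt h]
        have hq := aQ_nonneg lt (w - lt) hlt
        rw [String.append_assoc]
        have h1 : (" " : String) ++ spacesStr (aQ lt (w - lt)) = spacesStr (1 + aQ lt (w - lt)) := by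
          rw [← spaces_one]; exact spaces_add (by norm_num) hq
        rw [h1, add_comm 1 (aQ lt (w - lt)), Prod.mk.injEq]
        exact ⟨by ring, rfl⟩
      · rw [aWhile, dif_neg h]
        rw [aQ_small lt w hlt (by omega)]
        simp [spaces_zero]

-- after r steps of `tmp[i] = f tmp[i]`-style writes over range r, prefix is mapped

lemma foldl_set_const {α : Type} (v : α) :
    ∀ (n : Nat) (l : List α), n ≤ l.length →
    (List.range n).foldl (fun t i => t.set i v) l = List.replicate n v ++ l.drop n := by
  intro n
  induction n with
  | zero => intro l h; simp
  | succ n ih =>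
      intro l h
      rw [List.range_succ, List.foldl_append, ih l (by omega)]
      rw [List.foldl_cons, List.foldl_nil]
      rw [List.set_append_right _ _ (by simp)]
      simp only [List.length_replicate, Nat.sub_self]
      rw [List.drop_eq_getElem_cons (show n < l.length by omega), List.set_cons_zero]
      rw [List.replicate_succ' (n := n)]
      simp

lemma foldl_set_appendSp :
    ∀ (r : Nat) (l : List String), r ≤ l.length →
    (List.range r).foldl (fun t i => t.set i (t.getD i "" ++ " ")) l
      = (l.take r).map (fun s => s ++ " ") ++ l.drop r := by
  intro r
  induction r with
  | zero => intro l h; simp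
  | succ r ih =>
      intro l h
      rw [List.range_succ, List.foldl_append, ih l (by omega)]
      rw [List.foldl_cons, List.foldl_nil]
      have hlen : ((l.take r).map (fun s => s ++ " ")).length = r := by
        simp [min_eq_left (show r ≤ l.length by omega)]
      have hget : (((l.take r).map (fun s => s ++ " ")) ++ l.drop r).getD r "" = l[r]'(by omega) := by
        rw [List.getD_eq_getElem _ _ (by simp; omega)]
        rw [List.getElem_append_right (by omega)]
        simp [List.getElem_drop, min_eq_left (show r ≤ l.length by omega)]
      rw [hget, List.set_append_right _ _ (by omega)]
      rw [hlen, Nat.sub_self]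
      rw [List.drop_eq_getElem_cons (show r < l.length by omega), List.set_cons_zero]
      rw [List.take_succ_eq_append_getElem (show r < l.length by omega), List.map_append]
      simp

lemma range_map_ite {α : Type} (a b : α) :
    ∀ (n r : Nat), r ≤ n →
    (List.range n).map (fun k => if k < r then a else b)
      = List.replicate r a ++ List.replicate (n - r) b := by
  intro n
  induction n with
  | zero => intro r h; simp at h; simp [h]
  | succ n ih =>
      intro r h
      rw [List.range_succ, List.map_append, List.map_singleton]
      by_cases hr : r ≤ n
      · rw [ih r hr, if_neg (by omega)]
        have : n + 1 - r = (n - r) + 1 := by omega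
        rw [this, List.replicate_succ' (n := n - r)]
        simp
      · have hr1 : r = n + 1 := by omega
        subst hr1
        have hall : ∀ k ∈ List.range n, (if k < n + 1 then a else b) = a := by
          intro k hk
          rw [List.mem_range] at hk
          rw [if_pos (by omega)]
        rw [List.map_congr_left hall, if_pos (by omega), List.map_const']
        rw [Nat.sub_self, List.replicate_succ' (n := n)]
        simp

lemma afold (rI : Int) (hr : 0 ≤ rI) (l : List String) (hrl : rI.toNat ≤ l.length) :
    (PySem.List.pyRange 0 rI 1).foldl
      (fun t i => PySem.List.pySetD t i (PySem.List.pyGetD t i "" ++ " ")) l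
    = (l.take rI.toNat).map (fun s => s ++ " ") ++ l.drop rI.toNat := by
  rw [show rI = ((rI.toNat : Nat) : Int) from (Int.toNat_of_nonneg hr).symm]
  rw [PySem.List.pyRange_zero_nat, List.foldl_map]
  simp only [PySem.List.pySetD_natCast, PySem.List.pyGetD_natCast]
  rw [Int.toNat_natCast]
  exact foldl_set_appendSp rI.toNat l hrl

lemma bmap (n : Nat) (q rI : Int) (hr : 0 ≤ rI) (hrn : rI.toNat ≤ n) :
    (PySem.List.pyRange 0 ((n : Nat) : Int) 1).map
        (fun i => spacesStr (1 + q + (if i < rI then 1 else 0)))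
      = List.replicate rI.toNat (spacesStr (1 + q + 1))
        ++ List.replicate (n - rI.toNat) (spacesStr (1 + q)) := by
  rw [PySem.List.pyRange_zero_nat, List.map_map]
  have hall : ∀ k ∈ List.range n,
      ((fun i => spacesStr (1 + q + (if i < rI then 1 else 0))) ∘ (fun k : Nat => (k : Int))) k
        = if k < rI.toNat then spacesStr (1 + q + 1) else spacesStr (1 + q) := by
    intro k hk
    by_cases hkr : k < rI.toNat
    · rw [if_pos hkr]
      simp only [Function.comp_apply]
      rw [if_pos (by omega)]
    · rw [if_neg hkr]
      simp only [Function.comp_apply]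
      rw [if_neg (by omega)]
      norm_num
  rw [List.map_congr_left hall]
  exact range_map_ite _ _ n rI.toNat hrn

lemma amap (n r : Nat) (s : String) (hrn : r ≤ n) :
    ((List.replicate n s).take r).map (fun t => t ++ " ") ++ (List.replicate n s).drop r
      = List.replicate r (s ++ " ") ++ List.replicate (n - r) s := by
  rw [List.take_replicate, List.drop_replicate, List.map_replicate]
  rw [min_eq_left hrn]

lemma core (lt : Int) (h : 0 < lt) (w : Int) :
    (if (aWhile lt h w (List.replicate lt.toNat " ")).1 < lt then
        (PySem.List.pyRange 0 (aWhile lt h w (List.replicate lt.toNat " ")).1 1).foldl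
          (fun t i => PySem.List.pySetD t i (PySem.List.pyGetD t i "" ++ " "))
          (aWhile lt h w (List.replicate lt.toNat " ")).2
      else (aWhile lt h w (List.replicate lt.toNat " ")).2.map (fun i => i ++ " "))
    = (PySem.List.pyRange 0 lt 1).map
        (fun i => spacesStr (1 + PySem.Int.floordiv (max w 0) lt
            + (if i < PySem.Int.mod (max w 0) lt then 1 else 0))) := by
  obtain ⟨n, rfl⟩ : ∃ n : Nat, lt = (n : Int) := ⟨lt.toNat, (Int.toNat_of_nonneg h.le).symm⟩
  have hn : 0 < n := by omega
  rw [aWhile_spec _ h w.toNat w (le_refl _) _ " "]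
  simp only [Int.toNat_natCast]
  by_cases hw0 : 0 ≤ w
  · have hqdef : aQ (n : Int) w = PySem.Int.floordiv w (n : Int) := by unfold aQ; rw [if_pos hw0]
    have hq0 : 0 ≤ aQ (n : Int) w := aQ_nonneg _ w h
    have hmod : w - (n : Int) * aQ (n : Int) w = PySem.Int.mod w (n : Int) := by
      have h2 := PySem.Int.floordiv_mul_add_mod w (n : Int)
      rw [hqdef, mul_comm]
      omega
    have hm0 : 0 ≤ PySem.Int.mod w (n : Int) := PySem.Int.mod_nonneg w h
    have hmlt : PySem.Int.mod w (n : Int) < (n : Int) := PySem.Int.mod_lt w h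
    rw [hmod, if_pos hmlt]
    have hs1 : (" " : String) ++ spacesStr (aQ (n : Int) w) = spacesStr (1 + aQ (n : Int) w) := by
      rw [← spaces_one]; exact spaces_add (by norm_num) hq0
    rw [hs1]
    rw [afold _ hm0 _ (by simp; omega)]
    rw [amap n (PySem.Int.mod w (n : Int)).toNat _ (by omega)]
    rw [max_eq_left hw0, ← hqdef]
    rw [bmap n (aQ (n : Int) w) (PySem.Int.mod w (n : Int)) hm0 (by omega)]
    have hs2 : spacesStr (1 + aQ (n : Int) w) ++ " "
        = spacesStr (1 + aQ (n : Int) w + 1) := by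
      rw [← spaces_one]; exact spaces_add (by omega) (by norm_num)
    rw [hs2]
  · have hq : aQ (n : Int) w = 0 := aQ_small _ w h (by omega)
    rw [hq]
    simp only [mul_zero, sub_zero, spaces_zero, String.append_empty]
    rw [if_pos (by omega : w < (n : Int))]
    rw [PySem.List.pyRange_one_eq_nil (by omega : w ≤ 0), List.foldl_nil]
    rw [max_eq_right (by omega : w ≤ 0)]
    have hq2 : PySem.Int.floordiv 0 (n : Int) = 0 := by
      rw [PySem.Int.floordiv_eq_ediv_of_pos h]; exact Int.zero_ediv _
    have hm2 : PySem.Int.mod 0 (n : Int) = 0 := by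
      rw [PySem.Int.mod_eq_emod_of_pos h]; exact Int.zero_emod _
    rw [hq2, hm2]
    rw [bmap n 0 0 (le_refl 0) (by omega)]
    simp [spaces_one]

lemma aLine_eq_bLine (width : Int) (x : List String) : aLine width x = bLine width x := by
  by_cases h : 0 < (x.length : Int) - 1
  · simp only [aLine, bLine]
    rw [dif_pos h, if_pos h, joinLen]
    exact congrArg (fun t => t ++ ["\n"]) (core _ h _)
  · simp only [aLine, bLine]
    rw [dif_neg h, if_neg h]

lemma setAll (l : List String) :
    (PySem.List.pyRange 0 ((l.length : Nat) : Int) 1).foldl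
      (fun t i => PySem.List.pySetD t i " ") l = List.replicate l.length " " := by
  rw [PySem.List.pyRange_zero_nat, List.foldl_map]
  simp only [PySem.List.pySetD_natCast]
  rw [foldl_set_const " " l.length l (le_refl _)]
  simp

lemma set_last_replicate {α : Type} (m : Nat) (v u : α) :
    (List.replicate (m + 1) v).set m u = List.replicate m v ++ [u] := by
  rw [List.replicate_succ' (n := m)]
  rw [List.set_append_right _ _ (by simp)]
  simp

lemma pySetD_neg_one {α : Type} (l : List α) (h : l ≠ []) (v : α) :
    PySem.List.pySetD l (-1) v = l.set (l.length - 1) v := by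
  have hl : 0 < l.length := List.length_pos_iff.mpr h
  simp only [PySem.List.pySetD, PySem.List.pySet?, PySem.List.pyIdx?]
  rw [if_neg (by omega), if_pos (by omega)]
  simp

lemma bLine_length (width : Int) (x : List String) :
    (bLine width x).length = max x.length 1 := by
  simp only [bLine]
  by_cases h : 0 < (x.length : Int) - 1
  · rw [if_pos h]
    rw [List.length_append, List.length_map, PySem.List.length_pyRange_one]
    simp
    omega
  · rw [if_neg h]
    simp
    omega

lemma lastLine (width : Int) (x : List String) :
    PySem.List.pySetD
      ((PySem.List.pyRange 0 (((bLine width x).length : Nat) : Int) 1).foldl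
        (fun t i => PySem.List.pySetD t i " ") (bLine width x)) (-1) ""
    = List.replicate (max ((x.length : Int) - 1) 0).toNat " " ++ [""] := by
  rw [setAll]
  have hm : (bLine width x).length = (max x.length 1 - 1) + 1 := by
    rw [bLine_length]; omega
  rw [hm]
  rw [pySetD_neg_one _ (by simp) ""]
  simp only [List.length_replicate, Nat.add_sub_cancel]
  rw [set_last_replicate]
  congr 2
  omega

theorem main_eq (ltext : List (List String)) (width : Int) (hpre : ltext ≠ []) :
    get_whitespaces ltext width = get_whitespaces_alt ltext width := by
  unfold get_whitespaces get_whitespaces_alt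
  rw [PySem.List.foldl_append_singleton_eq_map (fun x => aLine width x) ltext []]
  simp only [List.nil_append]
  have hlast : (ltext.map (fun x => aLine width x)).getLast? = some (aLine width (ltext.getLast hpre)) := by
    rw [List.getLast?_map, List.getLast?_eq_some_getLast hpre]
    rfl
  rw [hlast]
  dsimp only
  rw [← List.map_dropLast, PySem.List.slice_to_neg_one]
  rw [PySem.List.pyGetD_neg_one ltext [] hpre]
  congr 1
  · exact List.map_congr_left (fun y _ => aLine_eq_bLine width y)
  · rw [aLine_eq_bLine]
    exact congrArg (fun t => [t]) (lastLine width (ltext.getLast hpre))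

-- ===== VERDICT (by name: the statement is the Claim_ definition above) =====
theorem get_whitespaces_spec : Claim_equal_get_whitespaces := by
  intro ltext width _ hpre
  unfold Pre_get_whitespaces at hpre
  unfold Spec_get_whitespaces
  exact main_eq ltext width hpre
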